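-- pv_equiv track=rewrite | github.com/stemomi/datashield-pii-lab | app/transformers/masker.py | _mask_tokenized_text
-- ===== SOURCE A (Python) =====
-- def _mask_tokenized_text(value: str) -> str:
--     parts: list[str] = []
--     token = ""
--
--     for char in value:
--         if char.isalnum():
--             token += char
--             continue
--         if token:
--             parts.append(_mask_middle(token, keep_start=1, keep_end=1))
--             token = ""
--         parts.append(char)
--
--     if token:
--         parts.append(_mask_middle(token, keep_start=1, keep_end=1))
--
--     return "".join(parts)
--
-- def _mask_middle(value: str, *, keep_start: int, keep_end: int) -> str:
--     if value is None:
--         return ""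
--     text = str(value)
--     if len(text) <= keep_start + keep_end:
--         return "*" * len(text)
--     return f"{text[:keep_start]}{'*' * (len(text) - keep_start - keep_end)}{text[-keep_end:]}"
-- ===== SOURCE B (Python) =====
-- def _mask_tokenized_text(value: str) -> str:
--     n = len(value)
--     alnum = [c.isalnum() for c in value]
--
--     def al(i: int) -> bool:
--         return 0 <= i < n and alnum[i]
--
--     def keep(i: int) -> bool:
--         # an alnum char survives iff it is the start or the end of a run of length >= 3
--         return ((not al(i - 1)) and al(i + 1) and al(i + 2)) or \
--                ((not al(i + 1)) and al(i - 1) and al(i - 2))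
--
--     return ''.join(
--         c if not alnum[i] or keep(i) else '*'
--         for i, c in enumerate(value)
--     )
-- ===== Notes on version B (the rewrite author's own statement) =====
-- stated objective: alternative
-- what changed: B replaces A's stateful token-accumulator loop and _mask_middle helper by a stateless per-character rule: it precomputes the isalnum flag array once and decides each output character independently from a 5-index window (an alnum char survives iff it starts or ends an alnum run of length >= 3, i.e. a neighbour condition on flags[i-2..i+2]), building the result with a single comprehension over enumerate.
import Mathlib
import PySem

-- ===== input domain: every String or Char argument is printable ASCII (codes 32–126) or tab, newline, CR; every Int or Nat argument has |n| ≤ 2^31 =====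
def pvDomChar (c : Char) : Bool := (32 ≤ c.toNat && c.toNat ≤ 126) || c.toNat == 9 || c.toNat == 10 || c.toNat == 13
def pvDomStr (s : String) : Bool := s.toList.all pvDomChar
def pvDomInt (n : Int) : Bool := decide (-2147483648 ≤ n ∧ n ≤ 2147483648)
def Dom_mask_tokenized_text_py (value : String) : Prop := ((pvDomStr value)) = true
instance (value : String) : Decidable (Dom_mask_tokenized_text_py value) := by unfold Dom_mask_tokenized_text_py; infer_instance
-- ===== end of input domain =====

-- B replaces A's stateful token-accumulator loop by a stateless per-character rule on a
-- precomputed isalnum flag array (5-index window); objective: alternative, same cost.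

-- ===== PORT A =====
-- _mask_middle (the 'value is None' branch is unreachable: value is a str here)
def mask_middle_py (text : List Char) (keep_start keep_end : Int) : List Char :=
  if (text.length : Int) ≤ keep_start + keep_end then
    List.replicate text.length '*'
  else
    PySem.List.slice text none (some keep_start)
      ++ List.replicate ((text.length : Int) - keep_start - keep_end).toNat '*'
      ++ PySem.List.slice text (some (-keep_end)) none

-- one iteration of A's for-loop; state = (parts, token)
def maskA_step (st : List (List Char) × List Char) (c : Char) :
    List (List Char) × List Char :=
  if PySem.Chars.isalnum c then
    (st.1, st.2 ++ [c])
  else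
    let parts := if st.2 ≠ [] then st.1 ++ [mask_middle_py st.2 1 1] else st.1
    (parts ++ [[c]], [])

def mask_tokenized_text_py (value : String) : String :=
  let st := value.toList.foldl maskA_step ([], [])
  let parts := if st.2 ≠ [] then st.1 ++ [mask_middle_py st.2 1 1] else st.1
  String.ofList parts.flatten

-- ===== PORT B =====
-- al(i): 0 <= i < n and alnum[i]
def alB (flags : List Bool) (i : Int) : Bool :=
  if 0 ≤ i ∧ i < (flags.length : Int) then flags.getD i.toNat false else false

-- keep(i): start of a run of length >= 3, or end of one
def keepB (flags : List Bool) (i : Int) : Bool :=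
  ((!alB flags (i - 1)) && alB flags (i + 1) && alB flags (i + 2))
  || ((!alB flags (i + 1)) && alB flags (i - 1) && alB flags (i - 2))

def mask_tokenized_text_py_alt (value : String) : String :=
  let flags := value.toList.map PySem.Chars.isalnum
  String.ofList ((PySem.List.enumerate value.toList).map (fun ic =>
    if !flags.getD ic.1.toNat false || keepB flags ic.1 then ic.2 else '*'))

-- ===== PRECONDITION & SPEC =====
def Spec_mask_tokenized_text_py (value : String) (out : String) : Prop := out = mask_tokenized_text_py_alt value
instance (value : String) (out : String) : Decidable (Spec_mask_tokenized_text_py value out) := by unfold Spec_mask_tokenized_text_py; infer_instance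

-- ===== CLAIM (what is proved, stated in full; the proofs are below) =====
def Claim_equal_mask_tokenized_text_py : Prop := ∀ (value : String), Dom_mask_tokenized_text_py value → Spec_mask_tokenized_text_py value (mask_tokenized_text_py value)

-- ===== LEMMAS AND PROOFS =====

-- proof-side middle ground no. 1: run-at-a-time masking (A's shape, groups made explicit)
def maskRun (g : List Char) : List Char :=
  if g.length ≤ 2 then List.replicate g.length '*'
  else g.take 1 ++ List.replicate (g.length - 2) '*' ++ g.drop (g.length - 1)

def maskB : List Char → List Char
  | [] => []
  | c :: cs =>
    let p := fun x => PySem.Chars.isalnum x == PySem.Chars.isalnum c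
    let run := c :: cs.takeWhile p
    (if PySem.Chars.isalnum c then maskRun run else run) ++ maskB (cs.dropWhile p)
termination_by l => l.length
decreasing_by
  simp only [List.length_cons]
  exact Nat.lt_succ_of_le (List.length_dropWhile_le _ _)

-- proof-side middle ground no. 2: char-at-a-time with a 2-bit lookbehind (B's shape, windows
-- made sequential): p2 p1 = isalnum flags of the two preceding characters
def nextAl : List Char → Bool
  | [] => false
  | d :: _ => PySem.Chars.isalnum d

def nextAl2 : List Char → Bool
  | _ :: d :: _ => PySem.Chars.isalnum d
  | _ => false

def maskW (p2 p1 : Bool) : List Char → List Char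
  | [] => []
  | c :: cs =>
      (if !(PySem.Chars.isalnum c) then c
       else if ((!p1 && nextAl cs && nextAl2 cs) || (!(nextAl cs) && p1 && p2)) then c
       else '*') :: maskW p1 (PySem.Chars.isalnum c) cs

-- ---------- A = maskB ----------

theorem mask_middle_eq_maskRun (t : List Char) : mask_middle_py t 1 1 = maskRun t := by
  unfold mask_middle_py maskRun
  by_cases h : t.length ≤ 2
  · rw [if_pos (by exact_mod_cast by omega : (t.length : Int) ≤ 1 + 1), if_pos h]
  · rw [if_neg (by exact_mod_cast by omega : ¬ (t.length : Int) ≤ 1 + 1), if_neg h]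
    rw [PySem.List.slice_to t (b := 1) (by norm_num), PySem.List.slice_from_neg_one]
    have h2 : ((t.length : Int) - 1 - 1).toNat = t.length - 2 := by omega
    norm_num [h2]

theorem maskB_cons_nonalnum (c : Char) (cs : List Char)
    (h : PySem.Chars.isalnum c = false) : maskB (c :: cs) = c :: maskB cs := by
  cases cs with
  | nil => simp [maskB, h]
  | cons d ds =>
    by_cases hd : PySem.Chars.isalnum d
    · simp [maskB, h, hd]
    · rw [maskB, maskB]
      simp only [h]
      simp [hd]

theorem takeWhile_all_append {α : Type} (p : α → Bool) (l₁ l₂ : List α)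
    (h : ∀ x ∈ l₁, p x = true) :
    (l₁ ++ l₂).takeWhile p = l₁ ++ l₂.takeWhile p ∧
    (l₁ ++ l₂).dropWhile p = l₂.dropWhile p := by
  induction l₁ with
  | nil => simp
  | cons a l ih =>
    have ha : p a = true := h a (by simp)
    have := ih (fun x hx => h x (by simp [hx]))
    simp [ha, this.1, this.2]

-- cs starts outside an alnum run
def headNotAlnum : List Char → Prop
  | [] => True
  | c :: _ => PySem.Chars.isalnum c = false

theorem maskB_alnum_run (t cs : List Char) (ht : t ≠ [])
    (hall : ∀ x ∈ t, PySem.Chars.isalnum x = true) (hcs : headNotAlnum cs) :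
    maskB (t ++ cs) = maskRun t ++ maskB cs := by
  cases t with
  | nil => exact absurd rfl ht
  | cons a ts =>
    have ha : PySem.Chars.isalnum a = true := hall a (by simp)
    have hts : ∀ x ∈ ts, (fun x => PySem.Chars.isalnum x == PySem.Chars.isalnum a) x = true := by
      intro x hx; simp [hall x (by simp [hx]), ha]
    have htk : cs.takeWhile (fun x => PySem.Chars.isalnum x == PySem.Chars.isalnum a) = []
             ∧ cs.dropWhile (fun x => PySem.Chars.isalnum x == PySem.Chars.isalnum a) = cs := by
      cases cs with
      | nil => simp
      | cons d ds =>
        have hd : PySem.Chars.isalnum d = false := hcs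
        constructor <;> simp [hd, ha]
    have h2 := takeWhile_all_append (fun x => PySem.Chars.isalnum x == PySem.Chars.isalnum a) ts cs hts
    simp only [List.cons_append]
    rw [maskB, h2.1, h2.2, htk.1, htk.2, ha]
    simp

-- the A-side finishing step, as a function of the loop state
def finishA (st : List (List Char) × List Char) : List Char :=
  (if st.2 ≠ [] then st.1 ++ [mask_middle_py st.2 1 1] else st.1).flatten

theorem loop_invariant (cs : List Char) :
    ∀ (parts : List (List Char)) (token : List Char),
    (∀ x ∈ token, PySem.Chars.isalnum x = true) →
    finishA (cs.foldl maskA_step (parts, token))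
      = parts.flatten ++ maskB (token ++ cs) := by
  induction cs with
  | nil =>
    intro parts token htok
    by_cases h : token = []
    · subst h; simp [finishA, maskB]
    · have hmb : maskB token = maskRun token := by
        simpa [maskB] using maskB_alnum_run token [] h htok trivial
      simp [finishA, h, hmb, mask_middle_eq_maskRun]
  | cons c cs ih =>
    intro parts token htok
    by_cases hc : PySem.Chars.isalnum c
    · have : maskA_step (parts, token) c = (parts, token ++ [c]) := by
        simp [maskA_step, hc]
      rw [List.foldl_cons, this,
        ih parts (token ++ [c]) (by intro x hx; rcases List.mem_append.1 hx with h | h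
                                    · exact htok x h
                                    · simp at h; subst h; exact hc)]
      simp
    · have hc' : PySem.Chars.isalnum c = false := by simpa using hc
      by_cases h : token = []
      · subst h
        have : maskA_step (parts, []) c = (parts ++ [[c]], []) := by
          simp [maskA_step, hc']
        rw [List.foldl_cons, this, ih (parts ++ [[c]]) [] (by simp)]
        simp only [List.nil_append]
        rw [maskB_cons_nonalnum c cs hc']
        simp
      · have : maskA_step (parts, token) c
            = (parts ++ [mask_middle_py token 1 1] ++ [[c]], []) := by
          simp [maskA_step, hc', h]
        rw [List.foldl_cons, this,
          ih (parts ++ [mask_middle_py token 1 1] ++ [[c]]) [] (by simp)]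
        simp only [List.nil_append]
        rw [maskB_alnum_run token (c :: cs) h htok hc',
          maskB_cons_nonalnum c cs hc', mask_middle_eq_maskRun]
        simp

-- ---------- maskB = maskW false false ----------

-- when the previous char is not alnum, the char before that is irrelevant
theorem maskW_p2_irrel (l : List Char) (p2 p2' : Bool) :
    maskW p2 false l = maskW p2' false l := by
  cases l with
  | nil => rfl
  | cons c cs => simp [maskW]

theorem maskW_of_headNotAlnum (cs : List Char) (h : headNotAlnum cs) (p2 p1 : Bool) :
    maskW p2 p1 cs = maskW false false cs := by
  cases cs with
  | nil => rfl
  | cons d ds =>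
    have hd : PySem.Chars.isalnum d = false := h
    rw [maskW, maskW]
    simp only [hd]
    rw [maskW_p2_irrel ds p1 false]
    simp

-- the tail of an alnum run (everything after its first char), char by char
def tailMask (p2 : Bool) : List Char → List Char
  | [] => []
  | [t] => [if p2 then t else '*']
  | _ :: t :: r => '*' :: tailMask true (t :: r)

theorem maskW_in_run (ts : List Char) : ∀ (cs : List Char) (p2 : Bool),
    (∀ x ∈ ts, PySem.Chars.isalnum x = true) → headNotAlnum cs →
    maskW p2 true (ts ++ cs) = tailMask p2 ts ++ maskW false false cs := by
  induction ts with
  | nil =>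
    intro cs p2 _ hcs
    simpa [tailMask] using maskW_of_headNotAlnum cs hcs p2 true
  | cons t l ih =>
    intro cs p2 hall hcs
    have ht : PySem.Chars.isalnum t = true := hall t (by simp)
    cases l with
    | nil =>
      have hn1 : nextAl cs = false := by
        cases cs with
        | nil => rfl
        | cons d ds => simpa [nextAl] using hcs
      rw [List.cons_append, List.nil_append, maskW, ht, hn1,
        maskW_of_headNotAlnum cs hcs true true]
      simp [tailMask]
    | cons b r =>
      have hb : PySem.Chars.isalnum b = true := hall b (by simp)
      rw [List.cons_append, maskW, ht]
      have hn1 : nextAl ((b :: r) ++ cs) = true := by simp [nextAl, hb]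
      rw [hn1, ih cs true (fun x hx => hall x (by simp [hx])) hcs]
      simp [tailMask]

-- closed form of tailMask true (no side conditions)
theorem tailMask_true (ts : List Char) :
    tailMask true ts = List.replicate (ts.length - 1) '*' ++ ts.drop (ts.length - 1) := by
  induction ts with
  | nil => rfl
  | cons a l ih =>
    cases l with
    | nil => rfl
    | cons b r =>
      rw [tailMask, ih]
      simp [List.replicate_succ]

theorem maskW_alnum_run (t cs : List Char) (ht : t ≠ [])
    (hall : ∀ x ∈ t, PySem.Chars.isalnum x = true) (hcs : headNotAlnum cs) (p2 : Bool) :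
    maskW p2 false (t ++ cs) = maskRun t ++ maskW false false cs := by
  cases t with
  | nil => exact absurd rfl ht
  | cons a ts =>
    have ha : PySem.Chars.isalnum a = true := hall a (by simp)
    rw [List.cons_append, maskW, ha,
      maskW_in_run ts cs false (fun x hx => hall x (by simp [hx])) hcs]
    cases ts with
    | nil =>
      have hn1 : nextAl cs = false := by
        cases cs with
        | nil => rfl
        | cons d ds => simpa [nextAl] using hcs
      simp [hn1, tailMask, maskRun]
    | cons b r =>
      have hb : PySem.Chars.isalnum b = true := hall b (by simp)
      cases r with
      | nil =>
        have hn2 : nextAl2 (b :: cs) = false := by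
          cases cs with
          | nil => rfl
          | cons d ds => simpa [nextAl2] using hcs
        simp [nextAl, hb, hn2, tailMask, maskRun]
      | cons c' r' =>
        have hc' : PySem.Chars.isalnum c' = true := hall c' (by simp)
        have hn1 : nextAl ((b :: c' :: r') ++ cs) = true := by simp [nextAl, hb]
        have hn2 : nextAl2 ((b :: c' :: r') ++ cs) = true := by simp [nextAl2, hc']
        rw [hn1, hn2, tailMask, tailMask_true]
        have hlen : (c' :: r').length - 1 = r'.length := by simp
        rw [maskRun]
        have hL : ¬ (a :: b :: c' :: r').length ≤ 2 := by simp
        rw [if_neg hL]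
        simp only [List.length_cons]
        have h1 : r'.length + 1 + 1 + 1 - 2 = r'.length + 1 := by omega
        have h2 : r'.length + 1 + 1 + 1 - 1 = r'.length + 2 := by omega
        rw [h1, h2]
        simp [List.replicate_succ, List.drop_succ_cons]

-- the head of a dropWhile-by-alnum remainder is never alnum
theorem headNotAlnum_dropWhile (l : List Char) :
    headNotAlnum (l.dropWhile (fun x => PySem.Chars.isalnum x == true)) := by
  induction l with
  | nil => trivial
  | cons a l ih =>
    by_cases ha : PySem.Chars.isalnum a
    · simpa [List.dropWhile_cons, ha] using ih
    · have ha' : PySem.Chars.isalnum a = false := by simpa using ha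
      simp [ha']
      exact ha'

theorem maskB_eq_maskW (l : List Char) : maskB l = maskW false false l := by
  induction hn : l.length using Nat.strong_induction_on generalizing l with
  | _ n ih =>
    cases l with
    | nil => simp [maskB, maskW]
    | cons c cs =>
      subst hn
      by_cases hc : PySem.Chars.isalnum c
      · have hp : (fun x => PySem.Chars.isalnum x == PySem.Chars.isalnum c)
                = (fun x => PySem.Chars.isalnum x == true) := by
          funext x; rw [hc]
        have hsplit : c :: cs
            = (c :: cs.takeWhile (fun x => PySem.Chars.isalnum x == true))
              ++ cs.dropWhile (fun x => PySem.Chars.isalnum x == true) := by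
          simp
        have hall : ∀ x ∈ c :: cs.takeWhile (fun x => PySem.Chars.isalnum x == true),
            PySem.Chars.isalnum x = true := by
          intro x hx
          rcases List.mem_cons.1 hx with h | h
          · subst h; exact hc
          · simpa using List.mem_takeWhile_imp h
        have hrest := headNotAlnum_dropWhile cs
        rw [maskB]
        simp only [hp]
        rw [hc, if_pos rfl]
        conv_rhs => rw [hsplit]
        rw [maskW_alnum_run _ _ (by simp) hall hrest false]
        congr 1
        refine ih _ ?_ _ rfl
        have h := List.length_dropWhile_le (fun x => PySem.Chars.isalnum x == true) cs
        simp only [List.length_cons]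
        omega
      · have hc' : PySem.Chars.isalnum c = false := by simpa using hc
        rw [maskB_cons_nonalnum c cs hc', maskW, hc']
        rw [if_pos (by simp)]
        exact congrArg _ (ih cs.length (by simp) cs rfl)

-- ---------- B's port = maskW false false ----------

theorem getD_drop (flags : List Bool) (k j : ℕ) :
    flags.getD (k + j) false = (flags.drop k).getD j false := by
  simp [List.getD_eq_getElem?_getD, List.getElem?_drop]

theorem alB_at (flags : List Bool) (k : ℕ) (c : Char) (cs : List Char)
    (hd : flags.drop k = (c :: cs).map PySem.Chars.isalnum)
    (hlen : flags.length = k + (cs.length + 1)) :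
    alB flags (k : Int) = PySem.Chars.isalnum c := by
  unfold alB
  rw [if_pos (by omega)]
  have : ((k : Int)).toNat = k := by omega
  rw [this]
  have := getD_drop flags k 0
  simp only [Nat.add_zero] at this
  rw [this, hd]
  rfl

theorem alB_next (flags : List Bool) (k : ℕ) (c : Char) (cs : List Char)
    (hd : flags.drop k = (c :: cs).map PySem.Chars.isalnum)
    (hlen : flags.length = k + (cs.length + 1)) :
    alB flags ((k : Int) + 1) = nextAl cs := by
  unfold alB
  cases cs with
  | nil =>
    rw [if_neg (by simp at hlen; omega)]
    rfl
  | cons d ds =>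
    rw [if_pos (by simp at hlen; omega)]
    have h1 : ((k : Int) + 1).toNat = k + 1 := by omega
    rw [h1, getD_drop flags k 1, hd]
    rfl

theorem alB_next2 (flags : List Bool) (k : ℕ) (c : Char) (cs : List Char)
    (hd : flags.drop k = (c :: cs).map PySem.Chars.isalnum)
    (hlen : flags.length = k + (cs.length + 1)) :
    alB flags ((k : Int) + 2) = nextAl2 cs := by
  unfold alB
  match cs with
  | [] => rw [if_neg (by simp at hlen; omega)]; rfl
  | [d] => rw [if_neg (by simp at hlen; omega)]; rfl
  | d :: e :: ds =>
    rw [if_pos (by simp at hlen; omega)]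
    have h1 : ((k : Int) + 2).toNat = k + 2 := by omega
    rw [h1, getD_drop flags k 2, hd]
    rfl

theorem portW (flags : List Bool) : ∀ (suffix : List Char) (k : ℕ),
    flags.drop k = suffix.map PySem.Chars.isalnum →
    flags.length = k + suffix.length →
    (PySem.List.enumerate suffix (k : Int)).map (fun ic =>
        if !flags.getD ic.1.toNat false || keepB flags ic.1 then ic.2 else '*')
      = maskW (alB flags ((k : Int) - 2)) (alB flags ((k : Int) - 1)) suffix := by
  intro suffix
  induction suffix with
  | nil => intro k _ _; simp [PySem.List.enumerate_nil, maskW]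
  | cons c cs ih =>
    intro k hd hlen
    have hlen' : flags.length = k + (cs.length + 1) := by simpa using hlen
    have hdrop1 : flags.drop (k + 1) = cs.map PySem.Chars.isalnum := by
      have : flags.drop (k + 1) = (flags.drop k).drop 1 := by
        rw [List.drop_drop]
      rw [this, hd]; rfl
    have ha0 := alB_at flags k c cs hd hlen'
    have hn1 := alB_next flags k c cs hd hlen'
    have hn2 := alB_next2 flags k c cs hd hlen'
    have hrec := ih (k + 1) hdrop1 (by simpa using by omega)
    rw [PySem.List.enumerate_cons, List.map_cons, maskW]
    congr 1
    · -- head characters agree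
      have hk : ((k : Int)).toNat = k := by omega
      have hget : flags.getD k false = PySem.Chars.isalnum c := by
        have := getD_drop flags k 0
        simp only [Nat.add_zero] at this
        rw [this, hd]; rfl
      have hkeep : keepB flags (k : Int)
          = ((!alB flags ((k : Int) - 1) && nextAl cs && nextAl2 cs)
             || (!(nextAl cs) && alB flags ((k : Int) - 1) && alB flags ((k : Int) - 2))) := by
        unfold keepB
        rw [hn1, hn2]
      simp only [hk, hget, hkeep]
      by_cases hc : PySem.Chars.isalnum c <;> simp [hc]
    · -- tails agree
      have hc1 : ((k : Int) + 1 - 2) = (k : Int) - 1 := by ring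
      have hc2 : ((k : Int) + 1 - 1) = (k : Int) := by ring
      have hcast : (((k + 1 : ℕ)) : Int) = (k : Int) + 1 := by push_cast; ring
      rw [← hcast] at hc1 hc2 ⊢
      rw [hrec, hc1, hc2, ha0]

-- both out-of-range lookbehinds at position 0 are false
theorem alB_neg (flags : List Bool) (i : Int) (h : i < 0) : alB flags i = false := by
  unfold alB
  rw [if_neg (by omega)]

-- ===== VERDICT (by name: the statement is the Claim_ definition above) =====
theorem mask_tokenized_text_py_spec : Claim_equal_mask_tokenized_text_py := by
  intro value _
  show mask_tokenized_text_py value = mask_tokenized_text_py_alt value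
  have hA := loop_invariant value.toList [] [] (by simp)
  simp only [finishA, List.nil_append, List.flatten_nil] at hA
  have hB := portW (value.toList.map PySem.Chars.isalnum) value.toList 0 (by simp) (by simp)
  simp only [Nat.cast_zero] at hB
  rw [alB_neg _ _ (by norm_num), alB_neg _ _ (by norm_num)] at hB
  simp only [mask_tokenized_text_py, mask_tokenized_text_py_alt]
  rw [hA, maskB_eq_maskW, hB]
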